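-- pv_equiv track=rewrite | github.com/SamanehGhafouri/leetcode | easy/smallest_index_with_equal_val.py | smallest_equal
-- ===== SOURCE A (Python) =====
-- from typing import List
--
-- def smallest_equal(nums: List[int]) -> int:
--     result = []
--     for i in range(len(nums)):
--
--         if i % 10 == nums[i]:
--             result.append(i)
--     if len(result) == 0:
--         return -1
--     return min(result)
-- ===== SOURCE B (Python) =====
-- def smallest_equal(nums):
--     for i, x in enumerate(nums):
--         if i % 10 == x:
--             return i
--     return -1
-- ===== Notes on version B (the rewrite author's own statement) =====
-- stated objective: simpler
-- what changed: Replaces A's collect-all-matches-into-a-list-then-min reduction with a single early-returning pass over enumerate that maintains no accumulator.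
import Mathlib
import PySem

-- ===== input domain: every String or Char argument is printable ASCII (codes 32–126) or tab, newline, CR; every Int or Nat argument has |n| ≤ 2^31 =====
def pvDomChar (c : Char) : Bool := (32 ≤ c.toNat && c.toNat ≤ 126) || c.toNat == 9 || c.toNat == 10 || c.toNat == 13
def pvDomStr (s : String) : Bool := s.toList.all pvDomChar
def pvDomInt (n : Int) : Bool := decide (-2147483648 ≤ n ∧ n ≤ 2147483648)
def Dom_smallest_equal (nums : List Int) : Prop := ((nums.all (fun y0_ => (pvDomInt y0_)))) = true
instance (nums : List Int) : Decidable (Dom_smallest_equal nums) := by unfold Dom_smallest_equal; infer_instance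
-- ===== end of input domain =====

-- B replaces A's collect-matches-then-min two-phase reduction by a single early-returning pass (simpler; same asymptotic cost).

-- ===== PORT A =====
-- Literal port: build the list of all matching indices, then return -1 if empty else its min.
def smallest_equal (nums : List Int) : Int :=
  let result := (PySem.List.pyRange 0 nums.length 1).foldl
    (fun acc i => if PySem.Int.mod i 10 = PySem.List.pyGetD nums i 0 then acc ++ [i] else acc) []
  if result.length = 0 then -1
  else match PySem.List.min? result (fun x => x) with
    | some m => m
    | none => 0   -- unreachable (result nonempty)

-- ===== PORT B =====
-- Literal port of B: scan with index, return the first match, else -1.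
def smallestEqualGo (i : Int) : List Int → Int
  | [] => -1
  | x :: rest => if PySem.Int.mod i 10 = x then i else smallestEqualGo (i + 1) rest

def smallest_equal_alt (nums : List Int) : Int := smallestEqualGo 0 nums

-- ===== PRECONDITION & SPEC =====
def Spec_smallest_equal (nums : List Int) (out : Int) : Prop := out = smallest_equal_alt nums
instance (nums : List Int) (out : Int) : Decidable (Spec_smallest_equal nums out) := by unfold Spec_smallest_equal; infer_instance

-- ===== CLAIM (what is proved, stated in full; the proofs are below) =====
def Claim_equal_smallest_equal : Prop := ∀ (nums : List Int), Dom_smallest_equal nums → Spec_smallest_equal nums (smallest_equal nums)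

-- ===== LEMMAS AND PROOFS =====

/-- Folding `min` over a list whose elements are all ≥ the seed returns the seed. -/
theorem foldl_min_eq_self (t : List Int) (a : Int) (h : ∀ y ∈ t, a ≤ y) :
    t.foldl min a = a := by
  induction t with
  | nil => rfl
  | cons y t ih =>
    simp only [List.foldl_cons]
    rw [min_eq_left (h y (by simp))]
    exact ih (fun z hz => h z (by simp [hz]))

/-- B's scanner equals `headD (-1)` of the filtered index range, where the element at
    virtual index `j` of the scanned suffix is looked up at offset `j - i`. -/
theorem go_eq_filter_head (xs : List Int) : ∀ (i : Int), 0 ≤ i →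
    smallestEqualGo i xs =
      ((PySem.List.pyRange i (i + xs.length) 1).filter
        (fun j => decide (PySem.Int.mod j 10 = PySem.List.pyGetD xs (j - i) 0))).headD (-1) := by
  induction xs with
  | nil =>
    intro i hi
    simp [smallestEqualGo]
  | cons x t ih =>
    intro i hi
    have hcons : PySem.List.pyRange i (i + ((x :: t).length : Int)) 1
        = i :: PySem.List.pyRange (i + 1) (i + ((x :: t).length : Int)) 1 :=
      PySem.List.pyRange_one_cons (by push_cast [List.length_cons]; omega)
    rw [hcons]
    have hlen : (i + (((x :: t)).length : Int)) = (i + 1) + (t.length : Int) := by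
      push_cast [List.length_cons]; ring
    have hfilt : (PySem.List.pyRange (i + 1) (i + ((x :: t).length : Int)) 1).filter
          (fun j => decide (PySem.Int.mod j 10 = PySem.List.pyGetD (x :: t) (j - i) 0))
        = (PySem.List.pyRange (i + 1) ((i + 1) + (t.length : Int)) 1).filter
          (fun j => decide (PySem.Int.mod j 10 = PySem.List.pyGetD t (j - (i + 1)) 0)) := by
      rw [hlen]
      apply List.filter_congr
      intro j hj
      have hmem := (PySem.List.mem_pyRange_one).1 hj
      have hget : PySem.List.pyGetD (x :: t) (j - i) 0 = PySem.List.pyGetD t (j - (i + 1)) 0 := by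
        have h1 : j - i = ((j - i).toNat : Int) := by omega
        have h2 : j - (i + 1) = ((j - (i+1)).toNat : Int) := by omega
        rw [h1, h2, PySem.List.pyGetD_natCast, PySem.List.pyGetD_natCast]
        have h3 : (j - i).toNat = (j - (i+1)).toNat + 1 := by omega
        rw [h3]
        simp [List.getD]
      rw [hget]
    have hgi : PySem.List.pyGetD (x :: t) (i - i) 0 = x := by
      simp [PySem.List.pyGetD_zero_cons]
    simp only [smallestEqualGo, List.filter_cons, hgi]
    by_cases hc : PySem.Int.mod i 10 = x
    · simp only [hc, decide_true, if_true, List.headD_cons]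
    · simp only [hc, decide_false, Bool.false_eq_true, if_false]
      rw [hfilt]
      exact ih (i + 1) (by omega)

/-- The filtered range is strictly increasing. -/
theorem filter_range_pairwise (a b : Int) (p : Int → Bool) :
    ((PySem.List.pyRange a b 1).filter p).Pairwise (· < ·) :=
  List.Pairwise.sublist List.filter_sublist (PySem.List.pairwise_lt_pyRange_one a b)

-- ===== VERDICT (by name: the statement is the Claim_ definition above) =====
theorem smallest_equal_spec : Claim_equal_smallest_equal := by
  intro nums _
  unfold Spec_smallest_equal smallest_equal smallest_equal_alt
  have hA : (PySem.List.pyRange 0 (nums.length : Int) 1).foldl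
      (fun acc i => if PySem.Int.mod i 10 = PySem.List.pyGetD nums i 0 then acc ++ [i] else acc) []
      = (PySem.List.pyRange 0 (nums.length : Int) 1).filter
        (fun j => decide (PySem.Int.mod j 10 = PySem.List.pyGetD nums j 0)) := by
    rw [PySem.List.foldl_append_ite_eq_filter]
    simp
  have hB := go_eq_filter_head nums 0 (le_refl 0)
  simp only [zero_add] at hB
  have hB' : smallestEqualGo 0 nums
      = ((PySem.List.pyRange 0 (nums.length : Int) 1).filter
        (fun j => decide (PySem.Int.mod j 10 = PySem.List.pyGetD nums j 0))).headD (-1) := by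
    rw [hB]
    congr 1
    apply List.filter_congr
    intro j _
    norm_num
  rw [hB']
  simp only [hA]
  set l := (PySem.List.pyRange 0 (nums.length : Int) 1).filter
    (fun j => decide (PySem.Int.mod j 10 = PySem.List.pyGetD nums j 0)) with hl
  cases hcase : l with
  | nil => simp
  | cons m t =>
    have hpw : l.Pairwise (· < ·) := hl ▸ filter_range_pairwise _ _ _
    rw [hcase] at hpw
    have hmin : ∀ y ∈ t, m ≤ y := fun y hy => le_of_lt ((List.pairwise_cons.1 hpw).1 y hy)
    simp only [List.length_cons, PySem.List.min?_id_cons]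
    rw [foldl_min_eq_self t m hmin]
    simp
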